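-- pv_equiv track=rewrite | github.com/banggeunho/CodingTest | 프로그래머스 코딩테스트/스트링/3진법 뒤집기.py | to3
-- ===== SOURCE A (Python) =====
-- def to3(n):
--     total = 0
--     location = 1
--     while n > 0:
--         total += location * (n % 3)
--         location *= 10
--         n //= 3
--
--     return total
-- ===== SOURCE B (Python) =====
-- def to3(n):
--     digits = []
--     while n > 0:
--         digits.append(n % 3)
--         n //= 3
--     total = 0
--     for d in reversed(digits):
--         total = total * 10 + d
--     return total
-- ===== Notes on version B (the rewrite author's own statement) =====
-- stated objective: alternative
-- what changed: B materialises the base-3 digit list in a first pass and then evaluates the reversed list by Horner's rule in a second pass, replacing A's fused single loop that maintains a power-of-ten 'location' accumulator.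
import Mathlib
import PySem

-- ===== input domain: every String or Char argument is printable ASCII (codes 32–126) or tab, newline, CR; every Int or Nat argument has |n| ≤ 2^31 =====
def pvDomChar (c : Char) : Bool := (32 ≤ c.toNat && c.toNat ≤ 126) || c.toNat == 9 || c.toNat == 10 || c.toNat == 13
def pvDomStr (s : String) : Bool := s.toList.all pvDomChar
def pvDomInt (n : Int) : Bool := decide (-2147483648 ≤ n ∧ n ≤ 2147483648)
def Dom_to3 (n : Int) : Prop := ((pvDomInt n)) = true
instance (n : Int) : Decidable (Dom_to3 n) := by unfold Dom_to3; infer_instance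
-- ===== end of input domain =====

-- B replaces A's fused accumulation loop (power-of-ten 'location') by two phases:
-- build the base-3 digit list, then Horner-evaluate its reverse; same values, same cost.

-- termination helper for the while-loops (cited by name in decreasing_by)
theorem pv_fd3_toNat_lt (n : Int) (h : 0 < n) :
    (PySem.Int.floordiv n 3).toNat < n.toNat := by
  have h3 : (0:Int) < 3 := by decide
  have h1 : PySem.Int.floordiv n 3 < n := by
    rw [PySem.Int.floordiv_lt_iff_lt_mul h3]; omega
  have h2 : (0:Int) ≤ PySem.Int.floordiv n 3 := by
    rw [PySem.Int.le_floordiv_iff_mul_le h3]; omega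
  omega

-- ===== PORT A =====
-- while n > 0: total += location * (n % 3); location *= 10; n //= 3
def to3.loop (n total location : Int) : Int :=
  if _h : 0 < n then
    to3.loop (PySem.Int.floordiv n 3) (total + location * PySem.Int.mod n 3) (location * 10)
  else total
termination_by n.toNat
decreasing_by exact pv_fd3_toNat_lt n _h

def to3 (n : Int) : Int := to3.loop n 0 1

-- ===== PORT B =====
-- phase 1: while n > 0: digits.append(n % 3); n //= 3
def to3_alt.digits (n : Int) (acc : List Int) : List Int :=
  if _h : 0 < n then
    to3_alt.digits (PySem.Int.floordiv n 3) (acc ++ [PySem.Int.mod n 3])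
  else acc
termination_by n.toNat
decreasing_by exact pv_fd3_toNat_lt n _h

-- phase 2: total = 0; for d in reversed(digits): total = total * 10 + d
def to3_alt (n : Int) : Int :=
  (to3_alt.digits n []).reverse.foldl (fun total d => total * 10 + d) 0

-- ===== PRECONDITION & SPEC =====
def Spec_to3 (n : Int) (out : Int) : Prop := out = to3_alt n
instance (n : Int) (out : Int) : Decidable (Spec_to3 n out) := by unfold Spec_to3; infer_instance

-- ===== CLAIM (what is proved, stated in full; the proofs are below) =====
def Claim_equal_to3 : Prop := ∀ (n : Int), Dom_to3 n → Spec_to3 n (to3 n)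

-- ===== LEMMAS AND PROOFS =====

-- value of an LSB-first digit list
def pvV : List Int → Int
  | [] => 0
  | d :: ds => d + 10 * pvV ds

theorem pv_digits_append (k : Nat) : ∀ (n : Int) (acc : List Int), n.toNat ≤ k →
    to3_alt.digits n acc = acc ++ to3_alt.digits n [] := by
  induction k with
  | zero =>
    intro n acc hk
    have h : ¬ 0 < n := by omega
    have hnil : to3_alt.digits n [] = [] := by rw [to3_alt.digits]; simp [h]
    rw [to3_alt.digits]; simp [h, hnil]
  | succ k ih =>
    intro n acc hk
    by_cases h : 0 < n
    · have hlt := pv_fd3_toNat_lt n h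
      have hstep : to3_alt.digits n [] =
          [PySem.Int.mod n 3] ++ to3_alt.digits (PySem.Int.floordiv n 3) [] := by
        rw [to3_alt.digits]; simp only [h, dif_pos, List.nil_append]
        exact ih _ _ (by omega)
      rw [to3_alt.digits]; simp only [h, dif_pos]
      rw [ih _ _ (by omega), hstep]; simp
    · have hnil : to3_alt.digits n [] = [] := by rw [to3_alt.digits]; simp [h]
      rw [to3_alt.digits]; simp [h, hnil]

theorem pv_loop_eq (k : Nat) : ∀ (n total location : Int), n.toNat ≤ k →
    to3.loop n total location = total + location * pvV (to3_alt.digits n []) := by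
  induction k with
  | zero =>
    intro n t l hk
    have h : ¬ 0 < n := by omega
    have hnil : to3_alt.digits n [] = [] := by rw [to3_alt.digits]; simp [h]
    rw [to3.loop]; simp [h, hnil, pvV]
  | succ k ih =>
    intro n t l hk
    by_cases h : 0 < n
    · have hlt := pv_fd3_toNat_lt n h
      have hstep : to3_alt.digits n [] =
          [PySem.Int.mod n 3] ++ to3_alt.digits (PySem.Int.floordiv n 3) [] := by
        rw [to3_alt.digits]; simp only [h, dif_pos, List.nil_append]
        exact pv_digits_append k _ _ (by omega)
      rw [to3.loop]; simp only [h, dif_pos]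
      rw [ih _ _ _ (by omega), hstep]
      simp [pvV]; ring
    · have hnil : to3_alt.digits n [] = [] := by rw [to3_alt.digits]; simp [h]
      rw [to3.loop]; simp [h, hnil, pvV]

theorem pv_foldl_rev (ds : List Int) :
    ds.reverse.foldl (fun total d => total * 10 + d) 0 = pvV ds := by
  induction ds with
  | nil => simp [pvV]
  | cons d ds ih =>
    simp only [List.reverse_cons, List.foldl_append, List.foldl_cons, List.foldl_nil, ih, pvV]
    ring

-- ===== VERDICT (by name: the statement is the Claim_ definition above) =====
theorem to3_spec : Claim_equal_to3 := by
  intro n _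
  unfold Spec_to3 to3 to3_alt
  rw [pv_foldl_rev, pv_loop_eq n.toNat n 0 1 (le_refl _)]
  ring
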